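-- pv_equiv track=rewrite | github.com/muskasaid02/csc349practice | main.py | min_penalty
-- ===== SOURCE A (Python) =====
-- def min_penalty(hotels):
--     # Number of hotels
--     n = len(hotels)
--
--     # Initialize DP array
--     dp = [float('inf')] * (n + 1)
--
--     # Starting point penalty is 0
--     dp[0] = 0
--     hotels.insert(0, 0)  # Insert the starting point at position 0
--
--     # Fill the DP table using the recursive formula
--     for i in range(1, n + 1):
--         for j in range(i):
--             dp[i] = min(dp[i], dp[j] + (300 - (hotels[i] - hotels[j]))**2)
--
--     # The cell that holds the solution
--     return dp[n]
-- ===== SOURCE B (Python) =====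
-- def _line(f, t):
--     return f[0] * t + f[1]
--
--
-- def _insert(tree, lo, hi, f):
--     # Li Chao tree insert of line f over node interval [lo, hi).
--     key = (lo, hi)
--     g = tree.get(key)
--     if g is None:
--         tree[key] = f
--         return
--     m = (lo + hi) // 2
--     if _line(f, m) < _line(g, m):
--         tree[key] = f
--         f, g = g, f
--     if hi - lo > 1:
--         if _line(f, lo) < _line(g, lo):
--             _insert(tree, lo, m, f)
--         else:
--             _insert(tree, m, hi, f)
--
--
-- def _query(tree, lo, hi, t):
--     # Minimum over all inserted lines at point t (lo <= t < hi).
--     g = tree.get((lo, hi))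
--     v = None if g is None else _line(g, t)
--     if hi - lo > 1:
--         m = (lo + hi) // 2
--         w = _query(tree, lo, m, t) if t < m else _query(tree, m, hi, t)
--         if w is not None and (v is None or w < v):
--             v = w
--     return v
--
--
-- def min_penalty(hotels):
--     # dp[i] = min_j dp[j] + (300 - (x_i - x_j))**2
--     #       = t**2 + min_j (2*x_j*t + dp[j] + x_j**2)   with t = 300 - x_i,
--     # so each j contributes a LINE in t; a Li Chao tree answers the min-over-lines
--     # query in O(log C), giving O(n log C) instead of A's O(n^2).
--     n = len(hotels)
--     xs = [0] + hotels
--     ts = [300 - x for x in xs]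
--     lo = min(ts)
--     hi = max(ts) + 1
--     tree = {}
--     dp = 0
--     _insert(tree, lo, hi, (2 * xs[0], dp + xs[0] ** 2))
--     for i in range(1, n + 1):
--         t = ts[i]
--         dp = t * t + _query(tree, lo, hi, t)
--         _insert(tree, lo, hi, (2 * xs[i], dp + xs[i] ** 2))
--     return dp
-- ===== Notes on version B (the rewrite author's own statement) =====
-- stated objective: faster
-- what changed: Replaces A's O(n^2) double-loop DP with a convex-hull-trick formulation: dp[i] = t^2 + min_j(2*x_j*t + dp[j] + x_j^2) with t = 300 - x_i, and the min over these lines is answered by a Li Chao tree (dict-backed segment tree over the query coordinate), so each DP step costs O(log C) instead of O(i); B also does not mutate the caller's list, whereas A inserts 0 into it.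
import Mathlib
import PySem

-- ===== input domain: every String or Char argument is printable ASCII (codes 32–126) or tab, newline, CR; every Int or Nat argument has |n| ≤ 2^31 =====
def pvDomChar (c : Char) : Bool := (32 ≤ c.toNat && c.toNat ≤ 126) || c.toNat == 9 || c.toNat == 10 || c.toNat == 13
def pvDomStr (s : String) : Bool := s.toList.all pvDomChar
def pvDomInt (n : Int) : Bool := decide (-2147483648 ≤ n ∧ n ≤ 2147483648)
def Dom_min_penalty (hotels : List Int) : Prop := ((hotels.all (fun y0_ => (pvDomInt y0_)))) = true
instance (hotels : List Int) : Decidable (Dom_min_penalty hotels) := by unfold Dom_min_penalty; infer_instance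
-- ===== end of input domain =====

-- A = forward O(n^2) DP; B = convex-hull-trick over lines 2*x_j*t + dp_j + x_j^2 answered by a
-- Li Chao tree (O(n log C), measured faster); equivalence is about the RETURN value only
-- (Python A mutates its argument via hotels.insert(0,0), B does not).


-- ===== PORT A =====
-- Python's float('inf') dp entries are modelled as Option Int (none = inf);
-- pvOmin is Python's two-argument min under that encoding (exact: min(inf,x)=x, ties keep the first argument).
def pvOmin : Option Int → Option Int → Option Int
  | none, b => b
  | some x, none => some x
  | some x, some y => some (min x y)

def min_penalty (hotels : List Int) : Int :=
  let n : Int := (hotels.length : Int)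
  let dp : List (Option Int) := (List.replicate (hotels.length + 1) (none : Option Int)).set 0 (some 0)
  let hs : List Int := 0 :: hotels     -- hotels.insert(0, 0)
  let dp := (PySem.List.pyRange 1 (n + 1) 1).foldl (fun dp i =>
      (PySem.List.pyRange 0 i 1).foldl (fun dp j =>
        PySem.List.pySetD dp i
          (pvOmin (PySem.List.pyGetD dp i none)
            ((PySem.List.pyGetD dp j none).map
              (fun v => v + (300 - (PySem.List.pyGetD hs i 0 - PySem.List.pyGetD hs j 0)) ^ 2)))) dp) dp
  (PySem.List.pyGetD dp n none).getD 0   -- dp[n] is always an int here; the default is unreachable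

-- ===== PORT B =====
-- Source B's _line(f, t)
def liLine (f : Int × Int) (t : Int) : Int := f.1 * t + f.2

-- Source B's _insert; the extra fuel argument only makes the halving recursion total
-- (callers pass (hi - lo).toNat, which the recursion never exhausts); the swapped
-- pair (tree', f', g') is kept as one tuple tf
def liInsert : Nat → PySem.Dict (Int × Int) (Int × Int) → Int → Int → Int × Int →
    PySem.Dict (Int × Int) (Int × Int)
  | 0, tree, _, _, _ => tree
  | fuel + 1, tree, lo, hi, f =>
    match tree.get? (lo, hi) with
    | none => tree.insert (lo, hi) f
    | some g =>
      let m := PySem.Int.floordiv (lo + hi) 2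
      let tf := if liLine f m < liLine g m then (tree.insert (lo, hi) f, g, f) else (tree, f, g)
      if 1 < hi - lo then
        if liLine tf.2.1 lo < liLine tf.2.2 lo then liInsert fuel tf.1 lo m tf.2.1
        else liInsert fuel tf.1 m hi tf.2.1
      else tf.1

-- Source B's _query; pvQcomb is the None/min plumbing of 'if w is not None and (v is None or w < v)'
def pvQcomb : Option Int → Option Int → Option Int
  | some wv, none => some wv
  | some wv, some vv => some (if wv < vv then wv else vv)
  | none, vv => vv

def liQuery : Nat → PySem.Dict (Int × Int) (Int × Int) → Int → Int → Int → Option Int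
  | 0, tree, lo, hi, t => (tree.get? (lo, hi)).map (fun g => liLine g t)
  | fuel + 1, tree, lo, hi, t =>
    let v := (tree.get? (lo, hi)).map (fun g => liLine g t)
    if 1 < hi - lo then
      let m := PySem.Int.floordiv (lo + hi) 2
      pvQcomb (if t < m then liQuery fuel tree lo m t else liQuery fuel tree m hi t) v
    else v

def min_penalty_alt (hotels : List Int) : Int :=
  let n : Int := (hotels.length : Int)
  let xs : List Int := 0 :: hotels
  let ts : List Int := xs.map (fun x => 300 - x)
  let lo : Int := (PySem.List.min? ts (fun y => y)).getD 0   -- ts is never empty; default unreachable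
  let hi : Int := (PySem.List.max? ts (fun y => y)).getD 0 + 1
  let fuel : Nat := (hi - lo).toNat                          -- totality guard for the halving recursion
  let tree := liInsert fuel PySem.Dict.empty lo hi
      (2 * PySem.List.pyGetD xs 0 0, 0 + (PySem.List.pyGetD xs 0 0) ^ 2)
  let res := (PySem.List.pyRange 1 (n + 1) 1).foldl
      (fun (st : PySem.Dict (Int × Int) (Int × Int) × Int) i =>
        let t := PySem.List.pyGetD ts i 0
        let dp := t * t + (liQuery fuel st.1 lo hi t).getD 0   -- the root always holds a line; none unreachable
        (liInsert fuel st.1 lo hi (2 * PySem.List.pyGetD xs i 0, dp + (PySem.List.pyGetD xs i 0) ^ 2), dp))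
      (tree, 0)
  res.2

-- ===== PRECONDITION & SPEC =====
def Spec_min_penalty (hotels : List Int) (out : Int) : Prop := out = min_penalty_alt hotels
instance (hotels : List Int) (out : Int) : Decidable (Spec_min_penalty hotels out) := by unfold Spec_min_penalty; infer_instance

-- ===== CLAIM (what is proved, stated in full; the proofs are below) =====
def Claim_equal_min_penalty : Prop := ∀ (hotels : List Int), Dom_min_penalty hotels → Spec_min_penalty hotels (min_penalty hotels)

-- ===== LEMMAS AND PROOFS =====

-- step cost of travelling from mile a to mile b
def pvC2 (a b : Int) : Int := (300 - (b - a)) ^ 2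

-- min cost from start 0 to endpoint e, given the REVERSED list of intermediate hotels
def pvMcr (a e : Int) : List Int → Int
  | [] => pvC2 a e
  | b :: t => min (pvMcr a b t + pvC2 b e) (pvMcr a e t)

-- min of a nonempty list, Python style
def pvMinNE : List Int → Int
  | [] => 0
  | h :: t => t.foldl min h

def pvX (hotels : List Int) (k : Nat) : Int := (0 :: hotels).getD k 0

def pvVA (hotels : List Int) : Nat → Int
  | 0 => 0
  | k + 1 => pvMcr 0 (pvX hotels (k + 1)) ((hotels.take k).reverse)

lemma minNE_append (l : List Int) (x : Int) (hl : l ≠ []) :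
    pvMinNE (l ++ [x]) = min (pvMinNE l) x := by
  cases l with
  | nil => exact absurd rfl hl
  | cons h t => simp [pvMinNE, List.foldl_append]

lemma pvX_append (q : List Int) (b : Int) (j : Nat) (h : j ≤ q.length) :
    pvX (q ++ [b]) j = pvX q j := by
  cases j with
  | zero => rfl
  | succ k =>
    simp only [pvX, List.getD, List.getElem?_cons_succ]
    rw [List.getElem?_append_left (by omega)]

lemma pvX_last (q : List Int) (b : Int) : pvX (q ++ [b]) (q.length + 1) = b := by
  simp [pvX, List.getD]

lemma pvVA_append (q : List Int) (b : Int) (j : Nat) (h : j ≤ q.length) :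
    pvVA (q ++ [b]) j = pvVA q j := by
  cases j with
  | zero => rfl
  | succ k =>
    simp only [pvVA]
    rw [pvX_append q b (k + 1) h, List.take_append_of_le_length (by omega)]

-- the DP's inner minimum equals pvMcr
lemma fold_mcr (pre : List Int) : ∀ e : Int,
    pvMinNE (((List.range (pre.length + 1)).map
      (fun j => pvVA pre j + pvC2 (pvX pre j) e))) = pvMcr 0 e pre.reverse := by
  induction pre using List.reverseRecOn with
  | nil => intro e; simp [pvVA, pvX, pvMinNE, pvMcr, pvC2]
  | append_singleton q b ih =>
    intro e
    have hlen : (q ++ [b]).length = q.length + 1 := by simp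
    rw [hlen, List.range_succ, List.map_append, List.map_cons, List.map_nil,
      minNE_append _ _ (by simp)]
    have hmap : (List.range (q.length + 1)).map
          (fun j => pvVA (q ++ [b]) j + pvC2 (pvX (q ++ [b]) j) e)
        = (List.range (q.length + 1)).map (fun j => pvVA q j + pvC2 (pvX q j) e) := by
      apply List.map_congr_left
      intro j hj
      rw [List.mem_range] at hj
      rw [pvVA_append q b j (by omega), pvX_append q b j (by omega)]
    rw [hmap, ih e]
    have hva : pvVA (q ++ [b]) (q.length + 1) = pvMcr 0 b q.reverse := by
      simp only [pvVA]
      rw [pvX_last, List.take_left]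
    rw [hva, pvX_last]
    rw [show (q ++ [b]).reverse = b :: q.reverse by simp]
    simp only [pvMcr]
    omega

lemma pvX_take (hotels : List Int) (m j : Nat) (_hm : m ≤ hotels.length) (hj : j ≤ m) :
    pvX (hotels.take m) j = pvX hotels j := by
  cases j with
  | zero => rfl
  | succ k =>
    simp only [pvX, List.getD, List.getElem?_cons_succ]
    rw [List.getElem?_take_of_lt (by omega)]

lemma pvVA_take (hotels : List Int) (m j : Nat) (hm : m ≤ hotels.length) (hj : j ≤ m) :
    pvVA (hotels.take m) j = pvVA hotels j := by
  cases j with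
  | zero => rfl
  | succ k =>
    simp only [pvVA]
    rw [pvX_take hotels m (k + 1) hm hj, List.take_take,
      show min k m = k by omega]

-- the Bellman step: the min over all predecessors of stage m+1 is pvVA (m+1) (used by BOTH ports' proofs)
lemma minNE_va (hotels : List Int) (m : Nat) (hm : m < hotels.length) :
    pvMinNE ((List.range (m + 1)).map
      (fun j => pvVA hotels j + pvC2 (pvX hotels j) (pvX hotels (m + 1))))
      = pvVA hotels (m + 1) := by
  have hlen : (hotels.take m).length = m := by
    rw [List.length_take]; omega
  have hmap : (List.range (m + 1)).map
        (fun j => pvVA hotels j + pvC2 (pvX hotels j) (pvX hotels (m + 1)))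
      = (List.range ((hotels.take m).length + 1)).map
        (fun j => pvVA (hotels.take m) j + pvC2 (pvX (hotels.take m) j) (pvX hotels (m + 1))) := by
    rw [hlen]
    apply List.map_congr_left
    intro j hj
    rw [List.mem_range] at hj
    rw [pvVA_take hotels m j (by omega) (by omega), pvX_take hotels m j (by omega) (by omega)]
  rw [hmap, fold_mcr]
  rw [show pvVA hotels (m + 1)
      = pvMcr 0 (pvX hotels (m + 1)) ((hotels.take m).reverse) from rfl]

-- ===== A port evaluates to pvVA n =====

lemma set_map_range {α : Type} (N t : Nat) (f : Nat → α) (v : α) (_ht : t < N) :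
    ((List.range N).map f).set t v = (List.range N).map (fun k => if k = t then v else f k) := by
  apply List.ext_getElem
  · simp
  · intro i h1 h2
    simp only [List.getElem_set, List.getElem_map, List.getElem_range]
    by_cases hit : t = i
    · subst hit; simp
    · rw [if_neg hit, if_neg (fun hh : i = t => hit hh.symm)]

-- dp after the outer loop has filled rows 1..m; slot m+1 carries the inner loop's running value o
def pvDpMid (hotels : List Int) (m : Nat) (o : Option Int) : List (Option Int) :=
  (List.range (hotels.length + 1)).map
    (fun k => if k ≤ m then some (pvVA hotels k) else if k = m + 1 then o else none)

-- the body of A's inner loop, as a named function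
def pvFstep (hotels : List Int) (i : Int) (dp : List (Option Int)) (j : Int) : List (Option Int) :=
  PySem.List.pySetD dp i
    (pvOmin (PySem.List.pyGetD dp i none)
      ((PySem.List.pyGetD dp j none).map
        (fun v => v + (300 - (PySem.List.pyGetD (0 :: hotels) i 0 - PySem.List.pyGetD (0 :: hotels) j 0)) ^ 2)))

-- the running inner minimum after j has ranged over 0..k-1
def pvPartial (hotels : List Int) (m k : Nat) : Option Int :=
  if k = 0 then none
  else some (pvMinNE ((List.range k).map
    (fun j => pvVA hotels j + pvC2 (pvX hotels j) (pvX hotels (m + 1)))))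

lemma portA_unfold (hotels : List Int) :
    min_penalty hotels = (PySem.List.pyGetD
      ((PySem.List.pyRange 1 ((hotels.length : Int) + 1) 1).foldl
        (fun dp i => (PySem.List.pyRange 0 i 1).foldl (pvFstep hotels i) dp)
        ((List.replicate (hotels.length + 1) (none : Option Int)).set 0 (some 0)))
      (hotels.length : Int) none).getD 0 := rfl

lemma getD_dpMid (hotels : List Int) (m k : Nat) (o : Option Int) (h : k ≤ hotels.length) :
    (pvDpMid hotels m o).getD k none
      = if k ≤ m then some (pvVA hotels k) else if k = m + 1 then o else none := by
  unfold pvDpMid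
  rw [PySem.List.getD_map_range _ _ _ _ (by omega)]

lemma init_dp (hotels : List Int) :
    (List.replicate (hotels.length + 1) (none : Option Int)).set 0 (some 0)
      = pvDpMid hotels 0 none := by
  apply List.ext_getElem
  · simp [pvDpMid]
  · intro i h1 h2
    simp only [List.getElem_set, List.getElem_replicate, pvDpMid, List.getElem_map,
      List.getElem_range]
    by_cases hi : i = 0
    · subst hi; simp [pvVA]
    · rw [if_neg (fun hh => hi hh.symm), if_neg (by omega : ¬ i ≤ 0), ite_self]

lemma A_inner_step (hotels : List Int) (m k : Nat) (hm : m < hotels.length) (hk : k ≤ m)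
    (o : Option Int) :
    pvFstep hotels (((m + 1 : Nat) : Int)) (pvDpMid hotels m o) ((k : Nat) : Int)
      = pvDpMid hotels m
          (pvOmin o (some (pvVA hotels k + pvC2 (pvX hotels k) (pvX hotels (m + 1))))) := by
  unfold pvFstep
  rw [PySem.List.pyGetD_natCast, PySem.List.pyGetD_natCast, PySem.List.pyGetD_natCast,
    PySem.List.pyGetD_natCast, PySem.List.pySetD_natCast]
  rw [getD_dpMid _ _ _ _ (by omega), getD_dpMid _ _ _ _ (by omega)]
  rw [if_neg (by omega), if_pos rfl, if_pos hk]
  rw [show ((0 : Int) :: hotels).getD (m + 1) 0 = pvX hotels (m + 1) from rfl,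
    show ((0 : Int) :: hotels).getD k 0 = pvX hotels k from rfl]
  rw [show (Option.some (pvVA hotels k)).map
        (fun v => v + (300 - (pvX hotels (m + 1) - pvX hotels k)) ^ 2)
      = some (pvVA hotels k + pvC2 (pvX hotels k) (pvX hotels (m + 1))) from rfl]
  unfold pvDpMid
  rw [set_map_range _ _ _ _ (by omega)]
  apply List.map_congr_left
  intro j hj
  rw [List.mem_range] at hj
  by_cases hjm : j = m + 1
  · subst hjm; rw [if_pos rfl, if_neg (by omega), if_pos rfl]
  · rw [if_neg hjm]
    by_cases hle : j ≤ m
    · rw [if_pos hle, if_pos hle]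
    · rw [if_neg hle, if_neg hle, if_neg hjm, if_neg hjm]

lemma partial_succ (hotels : List Int) (m k : Nat) :
    pvOmin (pvPartial hotels m k)
        (some (pvVA hotels k + pvC2 (pvX hotels k) (pvX hotels (m + 1))))
      = pvPartial hotels m (k + 1) := by
  cases k with
  | zero => rfl
  | succ k' =>
    unfold pvPartial
    rw [if_neg (by omega), if_neg (by omega)]
    conv_rhs => rw [List.range_succ]
    rw [List.map_append, List.map_cons, List.map_nil, minNE_append _ _ (by simp)]
    rfl

lemma A_inner (hotels : List Int) (m : Nat) (hm : m < hotels.length) : ∀ k : Nat, k ≤ m + 1 →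
    (PySem.List.pyRange 0 ((k : Nat) : Int) 1).foldl
        (pvFstep hotels (((m + 1 : Nat) : Int))) (pvDpMid hotels m none)
      = pvDpMid hotels m (pvPartial hotels m k) := by
  intro k
  induction k with
  | zero => intro _; rw [show (((0 : Nat) : Int)) = 0 from rfl,
      PySem.List.pyRange_one_eq_nil (by omega)]; rfl
  | succ k ih =>
    intro hk
    rw [show (((k + 1 : Nat) : Int)) = ((k : Nat) : Int) + 1 by push_cast; ring]
    rw [PySem.List.pyRange_one_succ_right (by omega), List.foldl_append, List.foldl_cons,
      List.foldl_nil, ih (by omega)]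
    rw [A_inner_step hotels m k hm (by omega)]
    congr 1
    exact partial_succ hotels m k

lemma A_outer_step (hotels : List Int) (m : Nat) (hm : m < hotels.length) :
    (PySem.List.pyRange 0 (((m + 1 : Nat) : Int)) 1).foldl
        (pvFstep hotels (((m + 1 : Nat) : Int))) (pvDpMid hotels m none)
      = pvDpMid hotels (m + 1) none := by
  rw [A_inner hotels m hm (m + 1) le_rfl]
  have hpart : pvPartial hotels m (m + 1) = some (pvVA hotels (m + 1)) := by
    unfold pvPartial
    rw [if_neg (by omega), minNE_va hotels m hm]
  rw [hpart]
  unfold pvDpMid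
  apply List.map_congr_left
  intro j hj
  rw [List.mem_range] at hj
  by_cases h1 : j ≤ m
  · rw [if_pos h1, if_pos (by omega)]
  · by_cases h2 : j = m + 1
    · subst h2; rw [if_neg h1, if_pos rfl, if_pos le_rfl]
    · rw [if_neg h1, if_neg h2, if_neg (show ¬ j ≤ m + 1 by omega), ite_self]

lemma A_loop (hotels : List Int) : ∀ m : Nat, m ≤ hotels.length →
    (PySem.List.pyRange 1 ((m : Int) + 1) 1).foldl
        (fun dp i => (PySem.List.pyRange 0 i 1).foldl (pvFstep hotels i) dp)
        (pvDpMid hotels 0 none)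
      = pvDpMid hotels m none := by
  intro m
  induction m with
  | zero => intro _; rw [PySem.List.pyRange_one_eq_nil (by omega)]; rfl
  | succ m ih =>
    intro h
    rw [show ((m + 1 : Nat) : Int) + 1 = ((m : Int) + 1) + 1 by push_cast; ring]
    rw [PySem.List.pyRange_one_succ_right (by omega), List.foldl_append, List.foldl_cons,
      List.foldl_nil, ih (by omega)]
    rw [show (m : Int) + 1 = ((m + 1 : Nat) : Int) by push_cast; ring]
    exact A_outer_step hotels m (by omega)

lemma portA_eq (hotels : List Int) : min_penalty hotels = pvVA hotels hotels.length := by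
  rw [portA_unfold, init_dp, A_loop hotels hotels.length le_rfl]
  rw [show ((hotels.length : Int)) = ((hotels.length : Nat) : Int) from rfl,
    PySem.List.pyGetD_natCast, getD_dpMid _ _ _ _ le_rfl, if_pos le_rfl]
  rfl

-- ===== B port: Li Chao tree correctness =====

-- midpoint bounds of the halving recursion
lemma liMid_bounds (lo hi : Int) (h : 1 < hi - lo) :
    lo < PySem.Int.floordiv (lo + hi) 2 ∧ PySem.Int.floordiv (lo + hi) 2 < hi := by
  constructor
  · rw [show lo < PySem.Int.floordiv (lo + hi) 2 ↔ lo + 1 ≤ PySem.Int.floordiv (lo + hi) 2 by omega,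
      PySem.Int.le_floordiv_iff_mul_le (by omega)]
    omega
  · rw [PySem.Int.floordiv_lt_iff_lt_mul (by omega)]
    omega

-- min of an optional running best and a new candidate (the value the query yields after one more insert)
def pvQmin : Option Int → Int → Int
  | none, x => x
  | some v, x => min v x

lemma pvQcomb_some (w : Option Int) (v : Int) : pvQcomb w (some v) = some (pvQmin w v) := by
  cases w with
  | none => rfl
  | some wv =>
    simp only [pvQcomb, pvQmin]
    congr 1
    by_cases h : wv < v
    · rw [if_pos h]; omega
    · rw [if_neg h]; omega

lemma pvQcomb_none (q : Option Int) : pvQcomb q none = q := by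
  cases q <;> rfl

lemma pvQcomb_map_some (w : Option Int) (g : Int × Int) (t : Int) :
    pvQcomb w (Option.map (fun g => liLine g t) (some g)) = some (pvQmin w (liLine g t)) := by
  rw [Option.map_some, pvQcomb_some]

-- insert only touches keys nested in [lo, hi)
lemma liInsert_frame : ∀ (fuel : Nat) (tree : PySem.Dict (Int × Int) (Int × Int)) (lo hi : Int)
    (f : Int × Int) (k : Int × Int), ¬ (lo ≤ k.1 ∧ k.2 ≤ hi) →
    (liInsert fuel tree lo hi f).get? k = tree.get? k := by
  intro fuel
  induction fuel with
  | zero => intro tree lo hi f k hk; rfl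
  | succ fuel ih =>
    intro tree lo hi f k hk
    have hkne : k ≠ (lo, hi) := by
      rintro rfl; exact hk ⟨le_refl _, le_refl _⟩
    simp only [liInsert]
    cases hg : tree.get? (lo, hi) with
    | none => rw [PySem.Dict.get?_insert, if_neg hkne]
    | some g =>
      simp only []
      by_cases hspl : 1 < hi - lo
      · obtain ⟨hm1, hm2⟩ := liMid_bounds lo hi hspl
        rw [if_pos hspl]
        have hins : (tree.insert (lo, hi) f).get? k = tree.get? k := by
          rw [PySem.Dict.get?_insert, if_neg hkne]
        by_cases hcmp : liLine f (PySem.Int.floordiv (lo + hi) 2)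
            < liLine g (PySem.Int.floordiv (lo + hi) 2)
        · rw [if_pos hcmp]
          simp only []
          by_cases hlo : liLine g lo < liLine f lo
          · rw [if_pos hlo, ih _ _ _ _ _ (by intro hc; exact hk ⟨hc.1, by omega⟩), hins]
          · rw [if_neg hlo, ih _ _ _ _ _ (by intro hc; exact hk ⟨by omega, hc.2⟩), hins]
        · rw [if_neg hcmp]
          simp only []
          by_cases hlo : liLine f lo < liLine g lo
          · rw [if_pos hlo, ih _ _ _ _ _ (by intro hc; exact hk ⟨hc.1, by omega⟩)]
          · rw [if_neg hlo, ih _ _ _ _ _ (by intro hc; exact hk ⟨by omega, hc.2⟩)]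
      · rw [if_neg hspl]
        by_cases hcmp : liLine f (PySem.Int.floordiv (lo + hi) 2)
            < liLine g (PySem.Int.floordiv (lo + hi) 2)
        · rw [if_pos hcmp]
          simp only []
          rw [PySem.Dict.get?_insert, if_neg hkne]
        · rw [if_neg hcmp]

-- query reads only keys nested in [lo, hi) (with nonempty intervals)
lemma liQuery_congr : ∀ (fuel : Nat) (t1 t2 : PySem.Dict (Int × Int) (Int × Int)) (lo hi t : Int),
    lo < hi →
    (∀ k : Int × Int, lo ≤ k.1 → k.2 ≤ hi → k.1 < k.2 → t1.get? k = t2.get? k) →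
    liQuery fuel t1 lo hi t = liQuery fuel t2 lo hi t := by
  intro fuel
  induction fuel with
  | zero =>
    intro t1 t2 lo hi t hlt h
    simp only [liQuery]
    rw [h (lo, hi) le_rfl le_rfl hlt]
  | succ fuel ih =>
    intro t1 t2 lo hi t hlt h
    simp only [liQuery]
    rw [h (lo, hi) le_rfl le_rfl hlt]
    by_cases hspl : 1 < hi - lo
    · obtain ⟨hm1, hm2⟩ := liMid_bounds lo hi hspl
      rw [if_pos hspl, if_pos hspl]
      congr 1
      by_cases ht : t < PySem.Int.floordiv (lo + hi) 2
      · rw [if_pos ht, if_pos ht,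
          ih _ _ _ _ _ hm1 (fun k ha hb hc => h k ha (by omega) hc)]
      · rw [if_neg ht, if_neg ht,
          ih _ _ _ _ _ hm2 (fun k ha hb hc => h k (by omega) hb hc)]
    · rw [if_neg hspl, if_neg hspl]

lemma liQuery_empty : ∀ (fuel : Nat) (lo hi t : Int),
    liQuery fuel PySem.Dict.empty lo hi t = none := by
  intro fuel
  induction fuel with
  | zero => intro lo hi t; rfl
  | succ fuel ih =>
    intro lo hi t
    simp only [liQuery]
    by_cases hspl : 1 < hi - lo
    · rw [if_pos hspl]
      by_cases ht : t < PySem.Int.floordiv (lo + hi) 2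
      · rw [if_pos ht, ih]
        rfl
      · rw [if_neg ht, ih]
        rfl
    · rw [if_neg hspl]
      rfl

-- two lines that are ordered at both ends of an interval are ordered in between
lemma liLine_between (f g : Int × Int) (lo m p : Int) (hlo : lo ≤ p) (hp : p ≤ m) (hlm : lo < m)
    (h1 : liLine g lo ≤ liLine f lo) (h2 : liLine g m ≤ liLine f m) : liLine g p ≤ liLine f p := by
  have key : (liLine f p - liLine g p) * (m - lo)
      = (m - p) * (liLine f lo - liLine g lo) + (p - lo) * (liLine f m - liLine g m) := by
    simp only [liLine]; ring
  nlinarith [mul_nonneg (by omega : (0:Int) ≤ m - p) (by omega : (0:Int) ≤ liLine f lo - liLine g lo),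
    mul_nonneg (by omega : (0:Int) ≤ p - lo) (by omega : (0:Int) ≤ liLine f m - liLine g m)]

-- a line that is worse at m and strictly better at lo < m stays worse to the right of m
lemma liLine_beyond (f g : Int × Int) (lo m p : Int) (hm : m ≤ p) (hlm : lo < m)
    (h1 : liLine f lo < liLine g lo) (h2 : liLine g m ≤ liLine f m) : liLine g p ≤ liLine f p := by
  have key : (liLine f p - liLine g p - (liLine f m - liLine g m)) * (m - lo)
      = (p - m) * ((liLine f m - liLine g m) - (liLine f lo - liLine g lo)) := by
    simp only [liLine]; ring
  nlinarith [mul_nonneg (by omega : (0:Int) ≤ p - m)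
    (by omega : (0:Int) ≤ (liLine f m - liLine g m) - (liLine f lo - liLine g lo))]

-- query unfoldings used by the invariant proof
lemma liQuery_node (fuel : Nat) (T : PySem.Dict (Int × Int) (Int × Int)) (lo hi t : Int)
    (hspl : 1 < hi - lo) :
    liQuery (fuel + 1) T lo hi t = pvQcomb
      (if t < PySem.Int.floordiv (lo + hi) 2
        then liQuery fuel T lo (PySem.Int.floordiv (lo + hi) 2) t
        else liQuery fuel T (PySem.Int.floordiv (lo + hi) 2) hi t)
      ((T.get? (lo, hi)).map (fun g => liLine g t)) := by
  simp only [liQuery]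
  rw [if_pos hspl]

lemma liQuery_leaf (fuel : Nat) (T : PySem.Dict (Int × Int) (Int × Int)) (lo hi t : Int)
    (hspl : ¬ 1 < hi - lo) :
    liQuery (fuel + 1) T lo hi t = (T.get? (lo, hi)).map (fun g => liLine g t) := by
  simp only [liQuery]
  rw [if_neg hspl]

-- THE Li Chao invariant: inserting a line adds exactly its value to every query in range
lemma liInsert_spec : ∀ (fuel : Nat) (tree : PySem.Dict (Int × Int) (Int × Int)) (lo hi : Int)
    (f : Int × Int) (t : Int), (hi - lo).toNat ≤ fuel → lo ≤ t → t < hi →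
    liQuery fuel (liInsert fuel tree lo hi f) lo hi t
      = some (pvQmin (liQuery fuel tree lo hi t) (liLine f t)) := by
  intro fuel
  induction fuel with
  | zero => intro tree lo hi f t hsz h1 h2; omega
  | succ fuel ih =>
    intro tree lo hi f t hsz h1 h2
    simp only [liInsert]
    cases hg : tree.get? (lo, hi) with
    | none =>
      by_cases hspl : 1 < hi - lo
      · have hmb := liMid_bounds lo hi hspl
        set m := PySem.Int.floordiv (lo + hi) 2 with hm
        obtain ⟨hm1, hm2⟩ := hmb
        rw [liQuery_node _ _ _ _ _ hspl, liQuery_node _ _ _ _ _ hspl, hg,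
          PySem.Dict.get?_insert, if_pos rfl, ← hm]
        have hchild : (if t < m then liQuery fuel (tree.insert (lo, hi) f) lo m t
              else liQuery fuel (tree.insert (lo, hi) f) m hi t)
            = (if t < m then liQuery fuel tree lo m t else liQuery fuel tree m hi t) := by
          by_cases ht : t < m
          · rw [if_pos ht, if_pos ht]
            apply liQuery_congr _ _ _ _ _ _ hm1
            intro k ha hb hc
            rw [PySem.Dict.get?_insert, if_neg (by rintro rfl; omega)]
          · rw [if_neg ht, if_neg ht]
            apply liQuery_congr _ _ _ _ _ _ hm2
            intro k ha hb hc
            rw [PySem.Dict.get?_insert, if_neg (by rintro rfl; omega)]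
        rw [hchild, pvQcomb_map_some, Option.map_none, pvQcomb_none]
      · rw [liQuery_leaf _ _ _ _ _ hspl, liQuery_leaf _ _ _ _ _ hspl, hg,
          PySem.Dict.get?_insert, if_pos rfl]
        rfl
    | some g =>
      simp only []
      by_cases hspl : 1 < hi - lo
      · have hmb := liMid_bounds lo hi hspl
        set m := PySem.Int.floordiv (lo + hi) 2 with hm
        obtain ⟨hm1, hm2⟩ := hmb
        rw [if_pos hspl]
        by_cases hcmp : liLine f m < liLine g m
        · -- the new line is better at m: it is stored at the node, g is pushed down
          rw [if_pos hcmp]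
          simp only []
          have hother : ∀ k : Int × Int, k ≠ (lo, hi)
              → (tree.insert (lo, hi) f).get? k = tree.get? k := by
            intro k hkne
            rw [PySem.Dict.get?_insert, if_neg hkne]
          by_cases hlo : liLine g lo < liLine f lo
          · rw [if_pos hlo]
            rw [liQuery_node _ _ _ _ _ hspl, liQuery_node _ _ _ _ _ hspl, hg, ← hm]
            rw [liInsert_frame _ _ _ _ _ _ (by omega),
              PySem.Dict.get?_insert, if_pos rfl]
            by_cases ht : t < m
            · rw [if_pos ht, if_pos ht]
              rw [ih _ _ _ _ _ (by omega) h1 ht]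
              rw [liQuery_congr fuel (tree.insert (lo, hi) f) tree lo m t hm1
                (fun k ha hb hc => hother k (by rintro rfl; omega)),
                pvQcomb_map_some, pvQcomb_map_some]
            · rw [if_neg ht, if_neg ht]
              have hord : liLine f t ≤ liLine g t :=
                liLine_beyond g f lo m t (by omega) hm1 hlo (by omega)
              rw [liQuery_congr fuel (liInsert fuel (tree.insert (lo, hi) f) lo m g)
                  (tree.insert (lo, hi) f) m hi t hm2
                (fun k ha hb hc => liInsert_frame _ _ _ _ _ _ (by omega)),
                liQuery_congr fuel (tree.insert (lo, hi) f) tree m hi t hm2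
                (fun k ha hb hc => hother k (by rintro rfl; omega)),
                pvQcomb_map_some, pvQcomb_map_some]
              cases liQuery fuel tree m hi t <;> simp only [pvQmin] <;> first | rfl | (congr 1; omega)
          · rw [if_neg hlo]
            rw [liQuery_node _ _ _ _ _ hspl, liQuery_node _ _ _ _ _ hspl, hg, ← hm]
            rw [liInsert_frame _ _ _ _ _ _ (by omega),
              PySem.Dict.get?_insert, if_pos rfl]
            by_cases ht : t < m
            · rw [if_pos ht, if_pos ht]
              have hord : liLine f t ≤ liLine g t :=
                liLine_between g f lo m t h1 (by omega) hm1 (by omega) (by omega)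
              rw [liQuery_congr fuel (liInsert fuel (tree.insert (lo, hi) f) m hi g)
                  (tree.insert (lo, hi) f) lo m t hm1
                (fun k ha hb hc => liInsert_frame _ _ _ _ _ _ (by omega)),
                liQuery_congr fuel (tree.insert (lo, hi) f) tree lo m t hm1
                (fun k ha hb hc => hother k (by rintro rfl; omega)),
                pvQcomb_map_some, pvQcomb_map_some]
              cases liQuery fuel tree lo m t <;> simp only [pvQmin] <;> first | rfl | (congr 1; omega)
            · rw [if_neg ht, if_neg ht]
              rw [ih _ _ _ _ _ (by omega) (by omega) h2]
              rw [liQuery_congr fuel (tree.insert (lo, hi) f) tree m hi t hm2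
                (fun k ha hb hc => hother k (by rintro rfl; omega)),
                pvQcomb_map_some, pvQcomb_map_some]
        · -- the stored line g stays: f is pushed down
          rw [if_neg hcmp]
          simp only []
          by_cases hlo : liLine f lo < liLine g lo
          · rw [if_pos hlo]
            rw [liQuery_node _ _ _ _ _ hspl, liQuery_node _ _ _ _ _ hspl, hg, ← hm]
            rw [liInsert_frame _ _ _ _ _ _ (by omega), hg]
            by_cases ht : t < m
            · rw [if_pos ht, if_pos ht]
              rw [ih _ _ _ _ _ (by omega) h1 ht, pvQcomb_map_some, pvQcomb_map_some]
              cases liQuery fuel tree lo m t <;> simp only [pvQmin] <;> first | rfl | (congr 1; omega)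
            · rw [if_neg ht, if_neg ht]
              have hord : liLine g t ≤ liLine f t :=
                liLine_beyond f g lo m t (by omega) hm1 hlo (by omega)
              rw [liQuery_congr fuel (liInsert fuel tree lo m f) tree m hi t hm2
                (fun k ha hb hc => liInsert_frame _ _ _ _ _ _ (by omega)),
                pvQcomb_map_some]
              cases liQuery fuel tree m hi t <;> simp only [pvQmin] <;> first | rfl | (congr 1; omega)
          · rw [if_neg hlo]
            rw [liQuery_node _ _ _ _ _ hspl, liQuery_node _ _ _ _ _ hspl, hg, ← hm]
            rw [liInsert_frame _ _ _ _ _ _ (by omega), hg]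
            by_cases ht : t < m
            · rw [if_pos ht, if_pos ht]
              have hord : liLine g t ≤ liLine f t :=
                liLine_between f g lo m t h1 (by omega) hm1 (by omega) (by omega)
              rw [liQuery_congr fuel (liInsert fuel tree m hi f) tree lo m t hm1
                (fun k ha hb hc => liInsert_frame _ _ _ _ _ _ (by omega)),
                pvQcomb_map_some]
              cases liQuery fuel tree lo m t <;> simp only [pvQmin] <;> first | rfl | (congr 1; omega)
            · rw [if_neg ht, if_neg ht]
              rw [ih _ _ _ _ _ (by omega) (by omega) h2, pvQcomb_map_some, pvQcomb_map_some]
              cases liQuery fuel tree m hi t <;> simp only [pvQmin] <;> first | rfl | (congr 1; omega)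
      · -- leaf node: hi = lo + 1 and t = lo = m
        have hmeq : PySem.Int.floordiv (lo + hi) 2 = lo := by
          rw [PySem.Int.floordiv_eq_iff_of_pos (by omega)]
          omega
        rw [if_neg hspl, hmeq]
        by_cases hcmp : liLine f lo < liLine g lo
        · rw [if_pos hcmp]
          simp only []
          rw [liQuery_leaf _ _ _ _ _ hspl, liQuery_leaf _ _ _ _ _ hspl, hg,
            PySem.Dict.get?_insert, if_pos rfl]
          have hteq : t = lo := by omega
          subst hteq
          simp only [Option.map_some, pvQmin]
          congr 1
          omega
        · rw [if_neg hcmp]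
          simp only []
          rw [liQuery_leaf _ _ _ _ _ hspl, hg]
          have hteq : t = lo := by omega
          subst hteq
          simp only [Option.map_some, pvQmin]
          congr 1
          omega

-- ===== B port evaluates to pvVA n =====

-- the line contributed by stage j
def pvLn (hotels : List Int) (j : Nat) : Int × Int :=
  (2 * pvX hotels j, pvVA hotels j + (pvX hotels j) ^ 2)

-- the Li Chao tree after stages 0..i have been inserted
def pvTree (hotels : List Int) (lo hi : Int) (i : Nat) : PySem.Dict (Int × Int) (Int × Int) :=
  (List.range (i + 1)).foldl
    (fun T j => liInsert (hi - lo).toNat T lo hi (pvLn hotels j)) PySem.Dict.empty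

lemma pvTree_succ (hotels : List Int) (lo hi : Int) (i : Nat) :
    pvTree hotels lo hi (i + 1)
      = liInsert (hi - lo).toNat (pvTree hotels lo hi i) lo hi (pvLn hotels (i + 1)) := by
  unfold pvTree
  rw [List.range_succ, List.foldl_append, List.foldl_cons, List.foldl_nil]

lemma pvTree_query (hotels : List Int) (lo hi : Int) (i : Nat) (t : Int)
    (h1 : lo ≤ t) (h2 : t < hi) :
    liQuery (hi - lo).toNat (pvTree hotels lo hi i) lo hi t
      = some (pvMinNE ((List.range (i + 1)).map (fun j => liLine (pvLn hotels j) t))) := by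
  induction i with
  | zero =>
    show liQuery (hi - lo).toNat
        (liInsert (hi - lo).toNat PySem.Dict.empty lo hi (pvLn hotels 0)) lo hi t = _
    rw [liInsert_spec _ _ _ _ _ _ le_rfl h1 h2, liQuery_empty]
    rfl
  | succ i ih =>
    rw [pvTree_succ, liInsert_spec _ _ _ _ _ _ le_rfl h1 h2, ih]
    conv_rhs => rw [List.range_succ]
    rw [List.map_append, List.map_cons, List.map_nil, minNE_append _ _ (by simp)]
    rfl

-- adding a constant commutes with the running minimum
lemma foldl_min_map_add (c : Int) (tl : List Int) : ∀ h : Int,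
    (tl.map (fun x => c + x)).foldl min (c + h) = c + tl.foldl min h := by
  induction tl with
  | nil => intro h; rfl
  | cons a tl ih =>
    intro h
    simp only [List.map_cons, List.foldl_cons]
    rw [min_add_add_left, ih]

lemma minNE_map_add (c : Int) (l : List Int) (hl : l ≠ []) :
    pvMinNE (l.map (fun x => c + x)) = c + pvMinNE l := by
  cases l with
  | nil => exact absurd rfl hl
  | cons h tl =>
    show (tl.map (fun x => c + x)).foldl min (c + h) = c + tl.foldl min h
    exact foldl_min_map_add c tl h

-- the body of B's loop, as a named function
def pvBstep (hotels : List Int) (lo hi : Int)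
    (st : PySem.Dict (Int × Int) (Int × Int) × Int) (i : Int) :
    PySem.Dict (Int × Int) (Int × Int) × Int :=
  let t := PySem.List.pyGetD ((0 :: hotels).map (fun x => 300 - x)) i 0
  let dp := t * t + (liQuery (hi - lo).toNat st.1 lo hi t).getD 0
  (liInsert (hi - lo).toNat st.1 lo hi
    (2 * PySem.List.pyGetD (0 :: hotels) i 0, dp + (PySem.List.pyGetD (0 :: hotels) i 0) ^ 2), dp)

lemma portB_unfold (hotels : List Int) :
    min_penalty_alt hotels
      = ((PySem.List.pyRange 1 ((hotels.length : Int) + 1) 1).foldl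
          (pvBstep hotels
            ((PySem.List.min? ((0 :: hotels).map (fun x => 300 - x)) (fun y => y)).getD 0)
            ((PySem.List.max? ((0 :: hotels).map (fun x => 300 - x)) (fun y => y)).getD 0 + 1))
          (liInsert
            ((((PySem.List.max? ((0 :: hotels).map (fun x => 300 - x)) (fun y => y)).getD 0 + 1)
              - (PySem.List.min? ((0 :: hotels).map (fun x => 300 - x)) (fun y => y)).getD 0).toNat)
            PySem.Dict.empty
            ((PySem.List.min? ((0 :: hotels).map (fun x => 300 - x)) (fun y => y)).getD 0)
            ((PySem.List.max? ((0 :: hotels).map (fun x => 300 - x)) (fun y => y)).getD 0 + 1)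
            (2 * PySem.List.pyGetD (0 :: hotels) 0 0,
              0 + (PySem.List.pyGetD (0 :: hotels) 0 0) ^ 2), 0)).2 := rfl

lemma pvX_getD (hotels : List Int) (k : Nat) (hk : k ≤ hotels.length) :
    PySem.List.pyGetD ((0 : Int) :: hotels) ((k : Nat) : Int) 0 = pvX hotels k := by
  rw [PySem.List.pyGetD_natCast]
  rfl

lemma ts_getD (hotels : List Int) (k : Nat) (hk : k ≤ hotels.length) :
    PySem.List.pyGetD (((0 : Int) :: hotels).map (fun x => 300 - x)) ((k : Nat) : Int) 0
      = 300 - pvX hotels k := by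
  rw [PySem.List.pyGetD_natCast]
  have hlt : k < ((0 : Int) :: hotels).length := by simp; omega
  rw [List.getD_eq_getElem?_getD, List.getElem?_map, List.getElem?_eq_getElem hlt]
  simp only [Option.map_some, Option.getD_some]
  rw [show pvX hotels k = ((0 : Int) :: hotels)[k] by
    simp [pvX, List.getD_eq_getElem?_getD, List.getElem?_eq_getElem hlt]]

lemma pvX_mem_ts (hotels : List Int) (k : Nat) (hk : k ≤ hotels.length) :
    (300 - pvX hotels k) ∈ ((0 : Int) :: hotels).map (fun x => 300 - x) := by
  have hlt : k < ((0 : Int) :: hotels).length := by simp; omega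
  have : pvX hotels k = ((0 : Int) :: hotels)[k] := by
    simp [pvX, List.getD_eq_getElem?_getD, List.getElem?_eq_getElem hlt]
  rw [this]
  exact List.mem_map_of_mem (List.getElem_mem hlt)

lemma B_loop (hotels : List Int) (lo hi : Int)
    (hb : ∀ k : Nat, k ≤ hotels.length → lo ≤ 300 - pvX hotels k ∧ 300 - pvX hotels k < hi) :
    ∀ m : Nat, m ≤ hotels.length →
    (PySem.List.pyRange 1 ((m : Int) + 1) 1).foldl (pvBstep hotels lo hi)
        (pvTree hotels lo hi 0, 0)
      = (pvTree hotels lo hi m, pvVA hotels m) := by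
  intro m
  induction m with
  | zero => intro _; rw [PySem.List.pyRange_one_eq_nil (by omega)]; rfl
  | succ m ih =>
    intro h
    rw [show ((m + 1 : Nat) : Int) + 1 = ((m : Int) + 1) + 1 by push_cast; ring]
    rw [PySem.List.pyRange_one_succ_right (by omega), List.foldl_append, List.foldl_cons,
      List.foldl_nil, ih (by omega)]
    rw [show (m : Int) + 1 = ((m + 1 : Nat) : Int) by push_cast; ring]
    obtain ⟨hb1, hb2⟩ := hb (m + 1) h
    unfold pvBstep
    simp only []
    rw [ts_getD hotels (m + 1) h, pvX_getD hotels (m + 1) h,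
      pvTree_query hotels lo hi m _ hb1 hb2, Option.getD_some]
    have hdp : (300 - pvX hotels (m + 1)) * (300 - pvX hotels (m + 1))
        + pvMinNE ((List.range (m + 1)).map (fun j => liLine (pvLn hotels j) (300 - pvX hotels (m + 1))))
        = pvVA hotels (m + 1) := by
      rw [← minNE_map_add _ _ (by simp), List.map_map]
      rw [show (List.range (m + 1)).map
            ((fun x => (300 - pvX hotels (m + 1)) * (300 - pvX hotels (m + 1)) + x)
              ∘ fun j => liLine (pvLn hotels j) (300 - pvX hotels (m + 1)))
          = (List.range (m + 1)).map
            (fun j => pvVA hotels j + pvC2 (pvX hotels j) (pvX hotels (m + 1))) by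
        apply List.map_congr_left
        intro j hj
        simp only [Function.comp, liLine, pvLn, pvC2]
        ring]
      exact minNE_va hotels m (by omega)
    rw [hdp]
    rw [show (2 * pvX hotels (m + 1), pvVA hotels (m + 1) + pvX hotels (m + 1) ^ 2)
        = pvLn hotels (m + 1) from rfl, ← pvTree_succ hotels lo hi m]

lemma portB_eq (hotels : List Int) : min_penalty_alt hotels = pvVA hotels hotels.length := by
  rw [portB_unfold]
  have hne : ((0 : Int) :: hotels).map (fun x => 300 - x) ≠ [] := by simp
  obtain ⟨mn, hmn⟩ : ∃ mn, PySem.List.min? (((0 : Int) :: hotels).map (fun x => 300 - x)) (fun y => y) = some mn := by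
    cases hx : PySem.List.min? (((0 : Int) :: hotels).map (fun x => 300 - x)) (fun y => y) with
    | none => exact absurd ((PySem.List.min?_eq_none_iff _ _).mp hx) hne
    | some v => exact ⟨v, rfl⟩
  obtain ⟨mx, hmx⟩ : ∃ mx, PySem.List.max? (((0 : Int) :: hotels).map (fun x => 300 - x)) (fun y => y) = some mx := by
    cases hx : PySem.List.max? (((0 : Int) :: hotels).map (fun x => 300 - x)) (fun y => y) with
    | none => exact absurd ((PySem.List.max?_eq_none_iff _ _).mp hx) hne
    | some v => exact ⟨v, rfl⟩
  rw [hmn, hmx]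
  simp only [Option.getD_some]
  have hb : ∀ k : Nat, k ≤ hotels.length → mn ≤ 300 - pvX hotels k ∧ 300 - pvX hotels k < mx + 1 := by
    intro k hk
    constructor
    · exact PySem.List.min?_isMin hmn _ (pvX_mem_ts hotels k hk)
    · have := PySem.List.max?_isMax hmx _ (pvX_mem_ts hotels k hk)
      omega
  have hinit : liInsert ((mx + 1 - mn).toNat) PySem.Dict.empty mn (mx + 1)
        (2 * PySem.List.pyGetD ((0 : Int) :: hotels) 0 0,
          0 + (PySem.List.pyGetD ((0 : Int) :: hotels) 0 0) ^ 2)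
      = pvTree hotels mn (mx + 1) 0 := by
    unfold pvTree
    rw [show List.range 1 = [0] from rfl, List.foldl_cons, List.foldl_nil]
    norm_num [pvLn, pvX, pvVA, PySem.List.pyGetD]
  rw [hinit,
    show ((hotels.length : Int)) = ((hotels.length : Nat) : Int) from rfl,
    B_loop hotels mn (mx + 1) hb hotels.length le_rfl]

-- ===== VERDICT (by name: the statement is the Claim_ definition above) =====
theorem min_penalty_spec : Claim_equal_min_penalty := by
  intro hotels _
  unfold Spec_min_penalty
  rw [portA_eq, portB_eq]
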